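-- pv_equiv track=rewrite | github.com/shunaaaaabbbbb/flowshop_two | solver.py | johnson_rule
-- ===== SOURCE A (Python) =====
-- def johnson_rule(m,p): #引数が「m:ジョブ数、p:処理時間」である関数を定義
--     Group1 = [] # Group1の初期リスト
--     Group2 = [] # Group2の初期リスト
--     p1 = {} # Group1に属すジョブの、機械1での処理時間を記憶しておく辞書（ソートの時に使う）
--     p2 = {} # Group2に属すジョブの、機械1での処理時間を記憶しておく辞書（ソートの時に使う）
--     for j in range(m): # 全てのジョブに対して
--         if p[0][j] <= p[1][j]: # (機械1での処理時間) ≦ (機械2での処理時間)なら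
--             Group1.append(j+1) # Group1にジョブjを追加する(注 : pythonではリストのインデックスが0から始まる)
--             p1[j+1] = p[0][j] # p1にジョブjの機械1での処理時間を記録しておく
--         else: #それ以外 ((機械1での処理時間) ＞ (機械2での処理時間))なら
--             Group2.append(j+1)# Group2にジョブjを追加する(注 : pythonではリストのインデックスが0から始まる)
--             p2[j+1] = p[1][j] # p2にジョブjの機械2での処理時間を記録しておく
--     Group1_sorted = sorted(Group1, key=lambda x:p1[x]) # 機械1での処理時間が小さい順にGroup1中のジョブをソートする
--     Group2_sorted = sorted(Group2, key=lambda x:p2[x], reverse=True) # 機械1での処理時間が大きい順にGroup1中のジョブをソートする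
--     return Group1_sorted+Group2_sorted # 並べ替えた2つのリストを繋げて返す
-- ===== SOURCE B (Python) =====
-- def johnson_rule(m, p):
--     # One stable sort of the job numbers 1..m under a lexicographic key:
--     # group-1 jobs (p0 <= p1) come first ordered by p0 ascending,
--     # group-2 jobs come after ordered by p1 descending (key -p1 ascending).
--     def key(j):
--         a, b = p[0][j - 1], p[1][j - 1]
--         return (1, -b) if a > b else (0, a)
--     return sorted(range(1, m + 1), key=key)
-- ===== Notes on version B (the rewrite author's own statement) =====
-- stated objective: simpler
-- what changed: Replaces the partition into two lists plus two processing-time dicts, two separate sorts and a concatenation by a single stable sort of the job numbers 1..m under one lexicographic key (group flag, p0 or -p1).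
import Mathlib
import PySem

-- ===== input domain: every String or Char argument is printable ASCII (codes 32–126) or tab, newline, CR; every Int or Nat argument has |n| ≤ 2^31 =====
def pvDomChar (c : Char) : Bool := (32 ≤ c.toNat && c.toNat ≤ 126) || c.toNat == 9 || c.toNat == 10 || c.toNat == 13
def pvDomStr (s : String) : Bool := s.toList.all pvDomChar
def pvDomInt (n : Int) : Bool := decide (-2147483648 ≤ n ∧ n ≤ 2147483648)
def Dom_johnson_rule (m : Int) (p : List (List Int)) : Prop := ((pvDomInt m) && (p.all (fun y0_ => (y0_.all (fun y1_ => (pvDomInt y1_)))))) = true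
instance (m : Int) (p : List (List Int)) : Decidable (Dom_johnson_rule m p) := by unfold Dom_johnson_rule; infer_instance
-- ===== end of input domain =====

-- B replaces A's partition into two lists + two dicts + two sorts + concatenation by a
-- single stable sort of the job numbers 1..m under one lexicographic key (simpler decomposition).


-- ===== PORT A =====
-- p[0][j] / p[1][j] are ported with pyGetD; Pre_johnson_rule keeps the indices in range, so the
-- default is never read there (Python raises IndexError exactly on the inputs Pre_ excludes).
-- Group1/Group2 dict lookups p1[x]/p2[x] use getD 0; the keys are always present (KeyError impossible).
def jaStep (p : List (List Int)) (st : List Int × List Int × PySem.Dict Int Int × PySem.Dict Int Int)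
    (j : Int) : List Int × List Int × PySem.Dict Int Int × PySem.Dict Int Int :=
  if PySem.List.pyGetD (PySem.List.pyGetD p 0 []) j 0 ≤ PySem.List.pyGetD (PySem.List.pyGetD p 1 []) j 0 then
    (st.1 ++ [j + 1], st.2.1, (st.2.2.1).insert (j + 1) (PySem.List.pyGetD (PySem.List.pyGetD p 0 []) j 0), st.2.2.2)
  else
    (st.1, st.2.1 ++ [j + 1], st.2.2.1, (st.2.2.2).insert (j + 1) (PySem.List.pyGetD (PySem.List.pyGetD p 1 []) j 0))

def johnson_rule (m : Int) (p : List (List Int)) : List Int :=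
  let st := (PySem.List.pyRange 0 m).foldl (jaStep p) ([], [], PySem.Dict.empty, PySem.Dict.empty)
  PySem.List.sorted st.1 (fun x => (st.2.2.1).getD x 0) ++
    PySem.List.sorted st.2.1 (fun x => (st.2.2.2).getD x 0) true

-- ===== PORT B =====
def jbKey1 (p : List (List Int)) (j : Int) : Int :=
  if PySem.List.pyGetD (PySem.List.pyGetD p 1 []) (j - 1) 0 <
      PySem.List.pyGetD (PySem.List.pyGetD p 0 []) (j - 1) 0 then 1 else 0

def jbKey2 (p : List (List Int)) (j : Int) : Int :=
  if PySem.List.pyGetD (PySem.List.pyGetD p 1 []) (j - 1) 0 <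
      PySem.List.pyGetD (PySem.List.pyGetD p 0 []) (j - 1) 0 then
    -(PySem.List.pyGetD (PySem.List.pyGetD p 1 []) (j - 1) 0)
  else PySem.List.pyGetD (PySem.List.pyGetD p 0 []) (j - 1) 0

def johnson_rule_alt (m : Int) (p : List (List Int)) : List Int :=
  PySem.List.sorted2 (PySem.List.pyRange 1 (m + 1)) (jbKey1 p) (jbKey2 p) false

-- ===== PRECONDITION & SPEC =====
-- Pre_ excludes exactly the inputs where A raises IndexError: a positive m with fewer than two
-- rows in p or a row shorter than m.
def Pre_johnson_rule (m : Int) (p : List (List Int)) : Prop :=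
  0 < m → (2 ≤ p.length ∧ m ≤ (p.headI.length : Int) ∧ m ≤ ((p.drop 1).headI.length : Int))
instance (m : Int) (p : List (List Int)) : Decidable (Pre_johnson_rule m p) := by
  unfold Pre_johnson_rule; infer_instance

def pvWitness_johnson_rule : Int × List (List Int) := (3, [[2, 5, 4], [3, 1, 4]])

def Spec_johnson_rule (m : Int) (p : List (List Int)) (out : List Int) : Prop := out = johnson_rule_alt m p
instance (m : Int) (p : List (List Int)) (out : List Int) : Decidable (Spec_johnson_rule m p out) := by unfold Spec_johnson_rule; infer_instance

-- ===== CLAIM (what is proved, stated in full; the proofs are below) =====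
def Claim_equal_johnson_rule : Prop := ∀ (m : Int) (p : List (List Int)), Dom_johnson_rule m p → Pre_johnson_rule m p → Spec_johnson_rule m p (johnson_rule m p)

-- ===== LEMMAS AND PROOFS =====

-- insertBy helpers
theorem insertBy_congr {α : Type} (before before' : α → α → Bool) (x : α) (ys : List α)
    (h : ∀ y ∈ ys, before x y = before' x y) :
    PySem.List.insertBy before x ys = PySem.List.insertBy before' x ys := by
  induction ys with
  | nil => rfl
  | cons y ys ih =>
    simp only [PySem.List.insertBy, h y (by simp)]
    split <;> simp_all

theorem insertBy_append_left {α : Type} (before : α → α → Bool) (x : α) (l1 l2 : List α)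
    (h : ∀ y ∈ l1, before x y = false) :
    PySem.List.insertBy before x (l1 ++ l2) = l1 ++ PySem.List.insertBy before x l2 := by
  induction l1 with
  | nil => rfl
  | cons y l1 ih =>
    simp only [List.cons_append, PySem.List.insertBy, h y (by simp)]
    simp [ih (fun y hy => h y (by simp [hy]))]

theorem insertBy_append_right {α : Type} (before : α → α → Bool) (x : α) (l1 l2 : List α)
    (h : ∀ y ∈ l2, before x y = true) :
    PySem.List.insertBy before x (l1 ++ l2) = PySem.List.insertBy before x l1 ++ l2 := by
  induction l1 with
  | nil =>
    cases l2 with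
    | nil => rfl
    | cons y l2 => simp [PySem.List.insertBy, h y (by simp)]
  | cons y l1 ih =>
    simp only [List.cons_append, PySem.List.insertBy]
    split <;> simp [ih]

-- key congruence for sorted
theorem sorted_congr_mem {α : Type} (xs : List α) (k k' : α → Int) (rev : Bool)
    (h : ∀ x ∈ xs, k x = k' x) :
    PySem.List.sorted xs k rev = PySem.List.sorted xs k' rev := by
  unfold PySem.List.sorted
  suffices H : ∀ (acc : List α), (∀ a ∈ acc, k a = k' a) →
      xs.foldl (fun a x => PySem.List.insertBy
        (if rev = true then fun a b => decide (k b < k a) else fun a b => decide (k a < k b)) x a) acc =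
      xs.foldl (fun a x => PySem.List.insertBy
        (if rev = true then fun a b => decide (k' b < k' a) else fun a b => decide (k' a < k' b)) x a) acc by
    exact H [] (by simp)
  induction xs with
  | nil => intro acc _; rfl
  | cons x xs ih =>
    intro acc hacc
    simp only [List.foldl_cons]
    rw [insertBy_congr _ (if rev = true then fun a b => decide (k' b < k' a) else fun a b => decide (k' a < k' b))]
    · refine ih (fun x hx => h x (by simp [hx])) _ ?_
      intro a ha
      rcases (PySem.List.mem_insertBy _ x a acc).1 ha with rfl | ha
      · exact h a (by simp)
      · exact hacc a ha
    · intro y hy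
      have hky : k y = k' y := hacc y hy
      have hkx : k x = k' x := h x (by simp)
      split <;> simp [hky, hkx]

-- the split lemma: one lexicographic insertion sort = sort of class 0 ++ reverse sort of class 1
theorem foldl_insertBy_split {α : Type} (c : α → Bool) (bA bB lex : α → α → Bool)
    (h00 : ∀ x y, c x = false → c y = false → lex x y = bA x y)
    (h11 : ∀ x y, c x = true → c y = true → lex x y = bB x y)
    (h01 : ∀ x y, c x = false → c y = true → lex x y = true)
    (h10 : ∀ x y, c x = true → c y = false → lex x y = false)
    (xs : List α) :
    xs.foldl (fun a x => PySem.List.insertBy lex x a) [] =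
      (xs.filter (fun x => !c x)).foldl (fun a x => PySem.List.insertBy bA x a) [] ++
      (xs.filter c).foldl (fun a x => PySem.List.insertBy bB x a) [] := by
  suffices H : ∀ (l1 l2 : List α), (∀ y ∈ l1, c y = false) → (∀ y ∈ l2, c y = true) →
      xs.foldl (fun a x => PySem.List.insertBy lex x a) (l1 ++ l2) =
      (xs.filter (fun x => !c x)).foldl (fun a x => PySem.List.insertBy bA x a) l1 ++
      (xs.filter c).foldl (fun a x => PySem.List.insertBy bB x a) l2 by
    simpa using H [] [] (by simp) (by simp)
  induction xs with
  | nil => intro l1 l2 _ _; simp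
  | cons x xs ih =>
    intro l1 l2 h1 h2
    simp only [List.foldl_cons, List.filter_cons]
    by_cases hc : c x = true
    · have : PySem.List.insertBy lex x (l1 ++ l2) = l1 ++ PySem.List.insertBy lex x l2 :=
        insertBy_append_left _ _ _ _ (fun y hy => h10 x y hc (h1 y hy))
      rw [this, insertBy_congr lex bB x l2 (fun y hy => h11 x y hc (h2 y hy))]
      have := ih l1 (PySem.List.insertBy bB x l2) h1 (fun y hy => by
        rcases (PySem.List.mem_insertBy bB x y l2).1 hy with rfl | hy
        · exact hc
        · exact h2 y hy)
      simpa [hc] using this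
    · have hc' : c x = false := by simpa using hc
      have : PySem.List.insertBy lex x (l1 ++ l2) = PySem.List.insertBy lex x l1 ++ l2 :=
        insertBy_append_right _ _ _ _ (fun y hy => h01 x y hc' (h2 y hy))
      rw [this, insertBy_congr lex bA x l1 (fun y hy => h00 x y hc' (h1 y hy))]
      have := ih (PySem.List.insertBy bA x l1) l2 (fun y hy => by
        rcases (PySem.List.mem_insertBy bA x y l1).1 hy with rfl | hy
        · exact hc'
        · exact h1 y hy) h2
      simpa [hc'] using this

-- abbreviations for the processing times (proof-side only)
def aof (p : List (List Int)) (j : Int) : Int := PySem.List.pyGetD (PySem.List.pyGetD p 0 []) j 0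
def bof (p : List (List Int)) (j : Int) : Int := PySem.List.pyGetD (PySem.List.pyGetD p 1 []) j 0

-- characterization of the two group lists built by A's loop
theorem ja_groups (p : List (List Int)) (js : List Int)
    (st : List Int × List Int × PySem.Dict Int Int × PySem.Dict Int Int) :
    (js.foldl (jaStep p) st).1 = st.1 ++ (js.filter (fun j => aof p j ≤ bof p j)).map (· + 1) ∧
    (js.foldl (jaStep p) st).2.1 = st.2.1 ++ (js.filter (fun j => !decide (aof p j ≤ bof p j))).map (· + 1) := by
  induction js generalizing st with
  | nil => simp
  | cons j js ih =>
    rcases ih (jaStep p st j) with ⟨h1, h2⟩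
    by_cases hc : PySem.List.pyGetD (PySem.List.pyGetD p 0 []) j 0 ≤ PySem.List.pyGetD (PySem.List.pyGetD p 1 []) j 0
    · constructor
      · rw [List.foldl_cons, h1]; simp [jaStep, hc, aof, bof]
      · rw [List.foldl_cons, h2]; simp [jaStep, hc, aof, bof]
    · constructor
      · rw [List.foldl_cons, h1]; simp [jaStep, hc, aof, bof]
      · rw [List.foldl_cons, h2]; simp [jaStep, hc, aof, bof]

-- the dicts are untouched at keys no remaining job writes
theorem ja_dict_preserve (p : List (List Int)) (js : List Int)
    (st : List Int × List Int × PySem.Dict Int Int × PySem.Dict Int Int) (x : Int)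
    (h : ∀ r ∈ js, r + 1 ≠ x) :
    ((js.foldl (jaStep p) st).2.2.1).getD x 0 = (st.2.2.1).getD x 0 ∧
    ((js.foldl (jaStep p) st).2.2.2).getD x 0 = (st.2.2.2).getD x 0 := by
  induction js generalizing st with
  | nil => simp
  | cons j js ih =>
    simp only [List.foldl_cons]
    rcases ih (jaStep p st j) (fun r hr => h r (by simp [hr])) with ⟨h1, h2⟩
    rw [h1, h2]
    have hj : j + 1 ≠ x := h j (by simp)
    unfold jaStep
    split <;> simp [PySem.Dict.getD_insert, Ne.symm hj]

-- each group-1 job's stored time is its machine-1 time, each group-2 job's its machine-2 time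
theorem ja_dict_vals (p : List (List Int)) (js : List Int)
    (st : List Int × List Int × PySem.Dict Int Int × PySem.Dict Int Int) (j : Int)
    (hmem : j ∈ js) (hnd : js.Nodup) :
    ((aof p j ≤ bof p j) → ((js.foldl (jaStep p) st).2.2.1).getD (j + 1) 0 = aof p j) ∧
    (¬(aof p j ≤ bof p j) → ((js.foldl (jaStep p) st).2.2.2).getD (j + 1) 0 = bof p j) := by
  induction js generalizing st with
  | nil => simp at hmem
  | cons r js ih =>
    simp only [List.foldl_cons]
    rcases List.mem_cons.1 hmem with rfl | hmem'
    · have hnotin : j ∉ js := (List.nodup_cons.1 hnd).1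
      rcases ja_dict_preserve p js (jaStep p st j) (j + 1)
        (fun r hr he => hnotin (by have hrj : r = j := by omega
                                   exact hrj ▸ hr)) with ⟨h1, h2⟩
      constructor
      · intro hc
        have hc' : PySem.List.pyGetD (PySem.List.pyGetD p 0 []) j 0 ≤ PySem.List.pyGetD (PySem.List.pyGetD p 1 []) j 0 := hc
        rw [h1]; simp [jaStep, hc', aof]
      · intro hc
        have hc' : ¬ (PySem.List.pyGetD (PySem.List.pyGetD p 0 []) j 0 ≤ PySem.List.pyGetD (PySem.List.pyGetD p 1 []) j 0) := hc
        rw [h2]; simp [jaStep, hc', bof]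
    · exact ih _ hmem' (List.nodup_cons.1 hnd).2

-- range(1, m+1) is range(m) shifted by one
theorem pyRange_shift (m : Int) :
    PySem.List.pyRange 1 (m + 1) = (PySem.List.pyRange 0 m).map (· + 1) := by
  rw [PySem.List.pyRange_of_pos 1 (m + 1) one_pos, PySem.List.pyRange_of_pos 0 m one_pos]
  have h1 : (if (1 : Int) < m + 1 then ((m + 1 - 1 + 1 - 1) / 1).toNat else 0) =
      (if (0 : Int) < m then ((m - 0 + 1 - 1) / 1).toNat else 0) := by
    by_cases hm : (0 : Int) < m
    · rw [if_pos (by omega), if_pos hm]; congr 1; omega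
    · rw [if_neg (by omega), if_neg hm]
  rw [h1, List.map_map]
  congr 1
  funext k
  simp
  omega

theorem pyRange_zero_nodup (m : Int) : (PySem.List.pyRange 0 m).Nodup := by
  rw [PySem.List.pyRange_of_pos 0 m one_pos]
  refine List.Nodup.map ?_ List.nodup_range
  intro a b hab
  simp at hab
  exact_mod_cast hab

-- ===== VERDICT (by name: the statement is the Claim_ definition above) =====
theorem johnson_rule_spec : Claim_equal_johnson_rule := by
  intro m p _ _
  unfold Spec_johnson_rule johnson_rule johnson_rule_alt
  simp only []
  rcases ja_groups p (PySem.List.pyRange 0 m) ([], [], PySem.Dict.empty, PySem.Dict.empty) with ⟨hg1, hg2⟩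
  simp only [List.nil_append] at hg1 hg2
  set st := (PySem.List.pyRange 0 m).foldl (jaStep p) ([], [], PySem.Dict.empty, PySem.Dict.empty) with hst
  -- replace the dict-lookup keys by the processing times themselves
  have hk1 : PySem.List.sorted st.1 (fun x => (st.2.2.1).getD x 0) =
      PySem.List.sorted st.1 (fun x => aof p (x - 1)) := by
    apply sorted_congr_mem
    intro x hx
    rw [hg1] at hx
    obtain ⟨j, hj, rfl⟩ := List.mem_map.1 hx
    have hj' := List.mem_filter.1 hj
    have hv := (ja_dict_vals p (PySem.List.pyRange 0 m)
      ([], [], PySem.Dict.empty, PySem.Dict.empty) j hj'.1 (pyRange_zero_nodup m)).1 (of_decide_eq_true hj'.2)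
    rw [← hst] at hv
    simpa using hv
  have hk2 : PySem.List.sorted st.2.1 (fun x => (st.2.2.2).getD x 0) true =
      PySem.List.sorted st.2.1 (fun x => bof p (x - 1)) true := by
    apply sorted_congr_mem
    intro x hx
    rw [hg2] at hx
    obtain ⟨j, hj, rfl⟩ := List.mem_map.1 hx
    have hj' := List.mem_filter.1 hj
    have hcf : ¬ (aof p j ≤ bof p j) := by simpa using hj'.2
    have hv := (ja_dict_vals p (PySem.List.pyRange 0 m)
      ([], [], PySem.Dict.empty, PySem.Dict.empty) j hj'.1 (pyRange_zero_nodup m)).2 hcf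
    rw [← hst] at hv
    simpa using hv
  rw [hk1, hk2, hg1, hg2]
  -- the B side: one lexicographic insertion sort, split into the two class sorts
  rw [pyRange_shift]
  unfold PySem.List.sorted2
  simp only [Bool.false_eq_true, if_false]
  rw [foldl_insertBy_split (fun x => decide (bof p (x - 1) < aof p (x - 1)))
      (fun x y => decide (aof p (x - 1) < aof p (y - 1)))
      (fun x y => decide (bof p (y - 1) < bof p (x - 1)))]
  · rw [PySem.List.sorted_eq_foldl_insertBy, PySem.List.sorted_rev_eq_foldl_insertBy]
    congr 1
    · congr 1
      rw [List.filter_map]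
      congr 1
      apply List.filter_congr
      intro j _
      simp only [Function.comp]
      have h1 : j + 1 - 1 = j := by omega
      rw [h1]
      by_cases h : bof p j < aof p j
      · simp [h, not_le.2 h]
      · simp [h, not_lt.1 h]
    · congr 1
      rw [List.filter_map]
      congr 1
      apply List.filter_congr
      intro j _
      simp only [Function.comp]
      have h1 : j + 1 - 1 = j := by omega
      rw [h1]
      by_cases h : bof p j < aof p j
      · simp [h, not_le.2 h]
      · simp [h, not_lt.1 h]
  · -- h00: two group-1 jobs compare by their machine-1 times
    intro x y hx hy
    simp only [decide_eq_false_iff_not, not_lt] at hx hy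
    simp only [aof, bof] at hx hy
    simp [jbKey1, jbKey2, not_lt.2 hx, not_lt.2 hy, aof]
  · -- h11: two group-2 jobs compare by their machine-2 times, reversed
    intro x y hx hy
    simp only [decide_eq_true_eq] at hx hy
    simp only [aof, bof] at hx hy
    simp [jbKey1, jbKey2, hx, hy, bof]
  · -- h01: a group-1 job always precedes a group-2 job
    intro x y hx hy
    simp only [decide_eq_false_iff_not, not_lt] at hx
    simp only [decide_eq_true_eq] at hy
    simp only [aof, bof] at hx hy
    simp [jbKey1, jbKey2, not_lt.2 hx, hy]
  · -- h10: a group-2 job never precedes a group-1 job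
    intro x y hx hy
    simp only [decide_eq_true_eq] at hx
    simp only [decide_eq_false_iff_not, not_lt] at hy
    simp only [aof, bof] at hx hy
    simp [jbKey1, jbKey2, hx, not_lt.2 hy]
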